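-- pv_equiv track=rewrite | github.com/user17-02/Puzzle | main.py | number_grid
-- ===== SOURCE A (Python) =====
-- def number_grid(grid):
--     rows, cols = len(grid), len(grid[0])
--     numbers = [[0] * cols for _ in range(rows)]
--     num = 1
--
--     for r in range(rows):
--         for c in range(cols):
--             if grid[r][c] == "#":
--                 continue
--
--             start_across = (
--                 (c == 0 or grid[r][c - 1] == "#") and
--                 (c + 1 < cols and grid[r][c + 1] != "#")
--             )
--
--             start_down = (
--                 (r == 0 or grid[r - 1][c] == "#") and
--                 (r + 1 < rows and grid[r + 1][c] != "#")
--             )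
--
--             if start_across or start_down:
--                 numbers[r][c] = num
--                 num += 1
--
--     return numbers
-- ===== SOURCE B (Python) =====
-- def run_starts(seq):
--     """Flags the first cell of every maximal run of non-'#' cells of length >= 2."""
--     n = len(seq)
--     flags = [False] * n
--     i = 0
--     while i < n:
--         if seq[i] == "#":
--             i += 1
--             continue
--         j = i
--         while j < n and seq[j] != "#":
--             j += 1
--         if j - i >= 2:
--             flags[i] = True
--         i = j
--     return flags
--
--
-- def number_grid(grid):
--     cols = len(grid[0])
--     rows = [row[:cols] for row in grid]
--     across = [run_starts(row) for row in rows]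
--     down = [run_starts(col) for col in zip(*rows)]
--     numbers = []
--     num = 1
--     for r in range(len(rows)):
--         out = []
--         for c in range(cols):
--             if across[r][c] or down[c][r]:
--                 out.append(num)
--                 num += 1
--             else:
--                 out.append(0)
--         numbers.append(out)
--     return numbers
-- ===== Notes on version B (the rewrite author's own statement) =====
-- stated objective: alternative
-- what changed: B replaces A's per-cell four-neighbour index tests by run-scanning: it flags across-starts by scanning each row for maximal runs of non-'#' cells of length >= 2, flags down-starts likewise on the transposed grid, and then assigns sequential numbers in one row-major combine pass over the two precomputed flag tables.
import Mathlib
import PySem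

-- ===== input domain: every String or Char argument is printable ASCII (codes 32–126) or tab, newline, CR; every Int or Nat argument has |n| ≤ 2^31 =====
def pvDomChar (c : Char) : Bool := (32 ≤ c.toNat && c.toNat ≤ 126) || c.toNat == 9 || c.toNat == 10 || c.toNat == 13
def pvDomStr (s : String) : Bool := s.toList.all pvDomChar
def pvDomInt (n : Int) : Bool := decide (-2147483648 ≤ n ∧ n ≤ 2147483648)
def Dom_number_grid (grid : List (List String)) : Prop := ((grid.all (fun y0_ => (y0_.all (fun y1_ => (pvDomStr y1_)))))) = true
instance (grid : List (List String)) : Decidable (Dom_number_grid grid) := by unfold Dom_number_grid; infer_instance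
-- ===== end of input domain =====

-- B numbers the crossword grid by run-scanning rows and columns for runs of length >= 2
-- (precomputed across/down flag tables combined in one row-major pass) instead of A's
-- per-cell four-neighbour index tests; objective: alternative decomposition, same O(rows*cols).


-- ===== PORT A =====
-- grid[r][c]; the defaults are never reached on inputs satisfying Pre_number_grid
def gcell (grid : List (List String)) (r c : Nat) : String :=
  (grid.getD r []).getD c ""

-- A's loop body for fixed r, one step per c (the two `let`s mirror start_across / start_down)
def stepA (grid : List (List String)) (rows cols r : Nat)
    (st : List (List Int) × Int) (c : Nat) : List (List Int) × Int :=
  if gcell grid r c = "#" then st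
  else
    let sa := (c == 0 || gcell grid r (c - 1) == "#") &&
              (decide (c + 1 < cols) && gcell grid r (c + 1) != "#")
    let sd := (r == 0 || gcell grid (r - 1) c == "#") &&
              (decide (r + 1 < rows) && gcell grid (r + 1) c != "#")
    if sa || sd then (st.1.set r ((st.1.getD r []).set c st.2), st.2 + 1) else st

def number_grid (grid : List (List String)) : List (List Int) :=
  let rows := grid.length
  let cols := (grid.headD []).length
  ((List.range rows).foldl
      (fun st r => (List.range cols).foldl (stepA grid rows cols r) st)
      (List.replicate rows (List.replicate cols (0 : Int)), 1)).1

-- ===== PORT B =====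
-- inner `while j < n and seq[j] != '#'` of run_starts: first index ≥ j out of range or '#'
def findRunEnd (seq : List String) (n j : Nat) : Nat :=
  if j < n ∧ seq.getD j "" ≠ "#" then findRunEnd seq n (j + 1) else j
termination_by n - j
decreasing_by omega

-- these two facts are cited by runStartsGo's termination proof, so they stay with the port
theorem findRunEnd_le (seq : List String) (n j : Nat) : j ≤ findRunEnd seq n j := by
  fun_induction findRunEnd seq n j with
  | case1 j h ih => omega
  | case2 j h => omega

theorem findRunEnd_gt (seq : List String) (n i : Nat)
    (h1 : i < n) (h2 : seq.getD i "" ≠ "#") : i < findRunEnd seq n i := by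
  rw [findRunEnd, if_pos ⟨h1, h2⟩]
  have := findRunEnd_le seq n (i + 1)
  omega

-- outer while loop of run_starts
def runStartsGo (seq : List String) (n i : Nat) (flags : List Bool) : List Bool :=
  if h : i < n then
    if seq.getD i "" = "#" then runStartsGo seq n (i + 1) flags
    else
      runStartsGo seq n (findRunEnd seq n i)
        (if 2 ≤ findRunEnd seq n i - i then flags.set i true else flags)
  else flags
termination_by n - i
decreasing_by
  · omega
  · have := findRunEnd_gt seq n i h (by assumption)
    omega

def runStarts (seq : List String) : List Bool :=
  runStartsGo seq seq.length 0 (List.replicate seq.length false)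

def number_grid_alt (grid : List (List String)) : List (List Int) :=
  let cols := (grid.headD []).length
  let rows := grid.map (fun row => row.take cols)
  let across := rows.map runStarts
  let down := (List.range cols).map (fun c => runStarts (rows.map (fun row => row.getD c "")))
  ((List.range rows.length).foldl
      (fun (st : List (List Int) × Int) r =>
        let inner := (List.range cols).foldl
          (fun (st2 : List Int × Int) c =>
            if (across.getD r []).getD c false || (down.getD c []).getD r false then
              (st2.1 ++ [st2.2], st2.2 + 1)
            else (st2.1 ++ [(0 : Int)], st2.2))
          ([], st.2)
        (st.1 ++ [inner.1], inner.2))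
      ([], 1)).1

-- ===== PRECONDITION & SPEC =====
-- Pre_ excludes exactly the inputs where A raises IndexError: the empty grid (grid[0])
-- and grids with a row shorter than the first row (grid[r][c] for c < len(grid[0])).
def Pre_number_grid (grid : List (List String)) : Prop :=
  grid ≠ [] ∧ ∀ row ∈ grid, (grid.headD []).length ≤ row.length

instance (grid : List (List String)) : Decidable (Pre_number_grid grid) := by
  unfold Pre_number_grid; infer_instance

def pvWitness_number_grid : List (List String) :=
  [["a", "a", "#"], ["a", "b", "c"]]

def Spec_number_grid (grid : List (List String)) (out : List (List Int)) : Prop :=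
  out = number_grid_alt grid
instance (grid : List (List String)) (out : List (List Int)) : Decidable (Spec_number_grid grid out) := by
  unfold Spec_number_grid; infer_instance

-- ===== CLAIM (what is proved, stated in full; the proofs are below) =====
def Claim_equal_number_grid : Prop :=
  ∀ (grid : List (List String)), Dom_number_grid grid → Pre_number_grid grid →
    Spec_number_grid grid (number_grid grid)

-- ===== LEMMAS AND PROOFS =====

-- the start predicate both programs decide at cell (r,c)
def startP (grid : List (List String)) (r c : Nat) : Bool :=
  (gcell grid r c != "#") &&
  (((c == 0 || gcell grid r (c - 1) == "#") &&
      (decide (c + 1 < (grid.headD []).length) && gcell grid r (c + 1) != "#")) ||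
   ((r == 0 || gcell grid (r - 1) c == "#") &&
      (decide (r + 1 < grid.length) && gcell grid (r + 1) c != "#")))

-- canonical row-major numbering driven by startP
def stepC (grid : List (List String)) (r : Nat) (st : List Int × Int) (c : Nat) : List Int × Int :=
  if startP grid r c then (st.1 ++ [st.2], st.2 + 1) else (st.1 ++ [(0 : Int)], st.2)

def stepOutC (grid : List (List String)) (st : List (List Int) × Int) (r : Nat) :
    List (List Int) × Int :=
  let inner := (List.range (grid.headD []).length).foldl (stepC grid r) ([], st.2)
  (st.1 ++ [inner.1], inner.2)

-- what run_starts computes at position c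
def flagSpec (seq : List String) (c : Nat) : Bool :=
  decide (c + 1 < seq.length) && (seq.getD c "" != "#") &&
  (c == 0 || seq.getD (c - 1) "" == "#") && (seq.getD (c + 1) "" != "#")

theorem getD_set_ne' {α : Type} (l : List α) (i c : Nat) (b d : α) (h : i ≠ c) :
    (l.set i b).getD c d = l.getD c d := by
  simp [List.getD_eq_getElem?_getD, List.getElem?_set_ne h]

theorem getD_set_self' {α : Type} (l : List α) (i : Nat) (b d : α) (h : i < l.length) :
    (l.set i b).getD i d = b := by
  simp [List.getD_eq_getElem?_getD, List.getElem?_set_self h]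


theorem flagSpec_false_of_len (seq : List String) (c : Nat) (h : ¬ c + 1 < seq.length) :
    flagSpec seq c = false := by
  unfold flagSpec
  rw [decide_eq_false h]
  simp only [Bool.false_and]

theorem flagSpec_false_of_sharp (seq : List String) (c : Nat) (h : seq.getD c "" = "#") :
    flagSpec seq c = false := by
  unfold flagSpec
  rw [h]
  simp only [bne_self_eq_false, Bool.and_false, Bool.false_and]

theorem flagSpec_false_of_next (seq : List String) (c : Nat) (h : seq.getD (c + 1) "" = "#") :
    flagSpec seq c = false := by
  unfold flagSpec
  rw [h]
  simp only [bne_self_eq_false, Bool.and_false]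

theorem flagSpec_false_of_prev (seq : List String) (c : Nat) (h0 : ¬ c = 0)
    (h : seq.getD (c - 1) "" ≠ "#") : flagSpec seq c = false := by
  unfold flagSpec
  rw [beq_eq_false_iff_ne.mpr h0, beq_eq_false_iff_ne.mpr h]
  simp only [Bool.or_false, Bool.and_false, Bool.false_and]

theorem flagSpec_true (seq : List String) (c : Nat) (h1 : c + 1 < seq.length)
    (h2 : seq.getD c "" ≠ "#") (h3 : c = 0 ∨ seq.getD (c - 1) "" = "#")
    (h4 : seq.getD (c + 1) "" ≠ "#") : flagSpec seq c = true := by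
  unfold flagSpec
  have b3 : (c == 0 || seq.getD (c - 1) "" == "#") = true := by
    rcases h3 with h | h
    · subst h; rfl
    · rw [beq_iff_eq.mpr h]
      simp only [Bool.or_true]
  rw [decide_eq_true h1, bne_iff_ne.mpr h2, b3, bne_iff_ne.mpr h4]
  rfl

theorem findRunEnd_mid (seq : List String) (n j : Nat) :
    ∀ k, j ≤ k → k < findRunEnd seq n j → k < n ∧ seq.getD k "" ≠ "#" := by
  fun_induction findRunEnd seq n j with
  | case1 j h ih =>
      intro k hk1 hk2
      by_cases hkj : k = j
      · subst hkj; exact h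
      · exact ih k (by omega) hk2
  | case2 j h =>
      intro k hk1 hk2; omega

theorem findRunEnd_end (seq : List String) (n j : Nat) :
    ¬ (findRunEnd seq n j < n ∧ seq.getD (findRunEnd seq n j) "" ≠ "#") := by
  fun_induction findRunEnd seq n j with
  | case1 j h ih => exact ih
  | case2 j h => exact h

theorem runStartsGo_spec (seq : List String) (n : Nat) (hn : n = seq.length) :
    ∀ (d i : Nat) (flags : List Bool), n - i ≤ d → flags.length = n →
      (∀ c, i ≤ c → flags.getD c false = false) →
      (∀ c, c < i → flags.getD c false = flagSpec seq c) →
      (i < n → i = 0 ∨ seq.getD (i - 1) "" = "#" ∨ seq.getD i "" = "#") →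
      ∀ c, (runStartsGo seq n i flags).getD c false = flagSpec seq c := by
  intro d
  induction d with
  | zero =>
      intro i flags hd hlen h2 h3 _ c
      have hin : ¬ i < n := by omega
      rw [runStartsGo, dif_neg hin]
      by_cases hc : c < i
      · exact h3 c hc
      · rw [h2 c (by omega)]
        exact (flagSpec_false_of_len seq c (by omega)).symm
  | succ d ih =>
      intro i flags hd hlen h2 h3 h4 c
      by_cases hin : i < n
      · rw [runStartsGo, dif_pos hin]
        by_cases hsharp : seq.getD i "" = "#"
        · rw [if_pos hsharp]
          refine ih (i + 1) flags (by omega) hlen (fun c hc => h2 c (by omega)) ?_ ?_ c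
          · intro c hc
            by_cases hci : c < i
            · exact h3 c hci
            · have hceq : c = i := by omega
              subst hceq
              rw [h2 c le_rfl]
              exact (flagSpec_false_of_sharp seq c hsharp).symm
          · intro _
            exact Or.inr (Or.inl (by simpa using hsharp))
        · rw [if_neg hsharp]
          have hij : i < findRunEnd seq n i := findRunEnd_gt seq n i hin hsharp
          have hmid := findRunEnd_mid seq n i
          have hend := findRunEnd_end seq n i
          set j := findRunEnd seq n i with hj
          have hbd : i = 0 ∨ seq.getD (i - 1) "" = "#" := by
            rcases h4 hin with h | h | h
            · exact Or.inl h
            · exact Or.inr h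
            · exact absurd h hsharp
          set flags' := if 2 ≤ j - i then flags.set i true else flags with hf
          have hlen' : flags'.length = n := by
            rw [hf]; split <;> simp [hlen]
          have hkeep : ∀ c, i ≠ c → flags'.getD c false = flags.getD c false := by
            intro c hne
            rw [hf]; split
            · exact getD_set_ne' flags i c true false hne
            · rfl
          refine ih j flags' (by omega) hlen' ?_ ?_ ?_ c
          · intro c hc
            rw [hkeep c (by omega)]
            exact h2 c (by omega)
          · intro c hc
            by_cases hci : c < i
            · rw [hkeep c (by omega)]; exact h3 c hci
            · by_cases hceq : c = i
              · subst hceq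
                have hval : flags'.getD c false = decide (2 ≤ j - c) := by
                  rw [hf]; split
                  · next h2le =>
                      rw [getD_set_self' flags c true false (by omega)]
                      exact (decide_eq_true h2le).symm
                  · next h2le =>
                      rw [h2 c le_rfl]
                      exact (decide_eq_false h2le).symm
                rw [hval]
                by_cases h2le : 2 ≤ j - c
                · have h1 := hmid (c + 1) (by omega) (by omega)
                  have hc1n : c + 1 < seq.length := by omega
                  rw [decide_eq_true h2le, flagSpec_true seq c hc1n hsharp hbd h1.2]
                · rw [decide_eq_false h2le]
                  have hj1 : j = c + 1 := by omega
                  by_cases hc1n : c + 1 < seq.length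
                  · have hsh : seq.getD (c + 1) "" = "#" := by
                      by_contra hne
                      exact hend ⟨by omega, by rw [hj1]; exact hne⟩
                    exact (flagSpec_false_of_next seq c hsh).symm
                  · exact (flagSpec_false_of_len seq c hc1n).symm
              · have hic : i < c := by omega
                rw [hkeep c (by omega), h2 c (by omega)]
                have hprev := hmid (c - 1) (by omega) (by omega)
                exact (flagSpec_false_of_prev seq c (by omega) hprev.2).symm
          · intro hjn
            have hsh : seq.getD j "" = "#" := by
              by_contra hne
              exact hend ⟨hjn, hne⟩
            exact Or.inr (Or.inr hsh)
      · rw [runStartsGo, dif_neg hin]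
        by_cases hc : c < i
        · exact h3 c hc
        · rw [h2 c (by omega)]
          exact (flagSpec_false_of_len seq c (by omega)).symm

theorem runStarts_getD (seq : List String) (c : Nat) :
    (runStarts seq).getD c false = flagSpec seq c := by
  unfold runStarts
  refine runStartsGo_spec seq seq.length rfl seq.length 0 (List.replicate seq.length false)
    (by omega) (by simp) ?_ ?_ ?_ c
  · intro c _
    rcases lt_or_ge c seq.length with h | h
    · rw [List.getD_replicate _ h]
    · rw [List.getD_eq_getElem?_getD, List.getElem?_eq_none (by simpa using h)]; rfl
  · intro c hc
    exact absurd hc (Nat.not_lt_zero c)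
  · intro _
    exact Or.inl rfl

-- A's per-cell step is exactly "assign iff startP"
theorem stepA_eq (grid : List (List String)) (r c : Nat) (st : List (List Int) × Int) :
    stepA grid grid.length (grid.headD []).length r st c
      = if startP grid r c then (st.1.set r ((st.1.getD r []).set c st.2), st.2 + 1) else st := by
  unfold stepA startP
  by_cases h : gcell grid r c = "#"
  · simp [h]
  · have hb : (gcell grid r c != "#") = true := bne_iff_ne.mpr h
    simp [h, hb]

theorem set_append_len {α : Type} (P Q : List α) (a : α) :
    (P ++ Q).set P.length a = P ++ Q.set 0 a := by
  induction P with
  | nil => rfl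
  | cons x t ih => exact congrArg (x :: ·) ih

theorem lenC (grid : List (List String)) (r : Nat) :
    ∀ (l : List Nat) (p : List Int) (num : Int),
      ((l.foldl (stepC grid r) (p, num)).1).length = p.length + l.length := by
  intro l
  induction l with
  | nil => intro p num; simp
  | cons a t ih =>
      intro p num
      by_cases h : startP grid r a
      · simp only [List.foldl_cons, stepC, if_pos h]
        rw [ih]
        simp only [List.length_append, List.length_cons, List.length_nil]
        omega
      · simp only [List.foldl_cons, stepC, if_neg h]
        rw [ih]
        simp only [List.length_append, List.length_cons, List.length_nil]
        omega

theorem lenOutC (grid : List (List String)) :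
    ∀ (l : List Nat) (P : List (List Int)) (num : Int),
      ((l.foldl (stepOutC grid) (P, num)).1).length = P.length + l.length := by
  intro l
  induction l with
  | nil => intro P num; simp
  | cons a t ih =>
      intro P num
      simp only [List.foldl_cons, stepOutC]
      rw [ih]
      simp only [List.length_append, List.length_cons, List.length_nil]
      omega

theorem innerA (grid : List (List String)) (r : Nat) :
    ∀ (k : Nat), k ≤ (grid.headD []).length → ∀ (M : List (List Int)) (num : Int),
      r < M.length → M.getD r [] = List.replicate (grid.headD []).length (0 : Int) →
      (List.range k).foldl (stepA grid grid.length (grid.headD []).length r) (M, num)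
        = (M.set r (((List.range k).foldl (stepC grid r) ([], num)).1
              ++ List.replicate ((grid.headD []).length - k) (0 : Int)),
           ((List.range k).foldl (stepC grid r) ([], num)).2) := by
  intro k
  induction k with
  | zero =>
      intro _ M num hr hrow
      simp only [List.range_zero, List.foldl_nil, Nat.sub_zero, List.nil_append]
      rw [← hrow, List.getD_eq_getElem M [] hr, List.set_getElem_self]
  | succ k ih =>
      intro hk M num hr hrow
      rw [List.range_succ, List.foldl_append, List.foldl_append,
          ih (by omega) M num hr hrow]
      simp only [List.foldl_cons, List.foldl_nil]
      rw [stepA_eq]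
      set F := List.foldl (stepC grid r) ([], num) (List.range k) with hF
      have hPlen : F.1.length = k := by rw [hF, lenC]; simp
      have hget : ((M.set r (F.1 ++ List.replicate ((grid.headD []).length - k) (0 : Int))).getD r [])
          = F.1 ++ List.replicate ((grid.headD []).length - k) (0 : Int) :=
        getD_set_self' _ _ _ _ hr
      have hrepl : List.replicate ((grid.headD []).length - k) (0 : Int)
          = (0 : Int) :: List.replicate ((grid.headD []).length - (k + 1)) (0 : Int) := by
        rw [show (grid.headD []).length - k = ((grid.headD []).length - (k + 1)) + 1 by omega,
            List.replicate_succ]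
      by_cases h : startP grid r k
      · rw [if_pos h]
        simp only [stepC, if_pos h]
        rw [hget, List.set_set]
        have hsa := set_append_len F.1 (List.replicate ((grid.headD []).length - k) (0 : Int)) F.2
        rw [hPlen] at hsa
        rw [hsa, hrepl]
        simp [List.append_assoc]
      · rw [if_neg h]
        simp only [stepC, if_neg h]
        rw [hrepl]
        simp [List.append_assoc]

theorem outerA (grid : List (List String)) :
    ∀ (k : Nat), k ≤ grid.length →
      (List.range k).foldl
          (fun st r => (List.range (grid.headD []).length).foldl
              (stepA grid grid.length (grid.headD []).length r) st)
          (List.replicate grid.length (List.replicate (grid.headD []).length (0 : Int)), 1)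
        = (((List.range k).foldl (stepOutC grid) ([], 1)).1
              ++ List.replicate (grid.length - k) (List.replicate (grid.headD []).length (0 : Int)),
           ((List.range k).foldl (stepOutC grid) ([], 1)).2) := by
  intro k
  induction k with
  | zero => simp
  | succ k ih =>
      intro hk
      rw [List.range_succ, List.foldl_append, List.foldl_append, ih (by omega)]
      simp only [List.foldl_cons, List.foldl_nil]
      set C := List.foldl (stepOutC grid) ([], (1 : Int)) (List.range k) with hC
      have hClen : C.1.length = k := by rw [hC, lenOutC]; simp
      have hMlen : ((C.1 ++ List.replicate (grid.length - k)
            (List.replicate (grid.headD []).length (0 : Int))).length) = grid.length := by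
        simp only [List.length_append, List.length_replicate, hClen]; omega
      have hgetk : ((C.1 ++ List.replicate (grid.length - k)
            (List.replicate (grid.headD []).length (0 : Int))).getD k [])
          = List.replicate (grid.headD []).length (0 : Int) := by
        rw [List.getD_eq_getElem?_getD, List.getElem?_append_right (by omega), hClen]
        simp only [Nat.sub_self, List.getElem?_replicate]
        rw [if_pos (by omega)]
        rfl
      rw [innerA grid k (grid.headD []).length le_rfl _ _ (by omega) hgetk]
      simp only [Nat.sub_self, List.replicate_zero, List.append_nil]
      have hrepl : List.replicate (grid.length - k) (List.replicate (grid.headD []).length (0 : Int))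
          = List.replicate (grid.headD []).length (0 : Int)
            :: List.replicate (grid.length - (k + 1)) (List.replicate (grid.headD []).length (0 : Int)) := by
        rw [show grid.length - k = (grid.length - (k + 1)) + 1 by omega, List.replicate_succ]
      have hsa := set_append_len C.1
        (List.replicate (grid.length - k) (List.replicate (grid.headD []).length (0 : Int)))
        ((List.range (grid.headD []).length).foldl (stepC grid k) ([], C.2)).1
      rw [hClen] at hsa
      rw [hsa, hrepl]
      simp [stepOutC, List.append_assoc]

theorem A_eq_canon (grid : List (List String)) :
    number_grid grid = ((List.range grid.length).foldl (stepOutC grid) ([], 1)).1 := by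
  have hdef : number_grid grid
      = ((List.range grid.length).foldl
          (fun st r => (List.range (grid.headD []).length).foldl
              (stepA grid grid.length (grid.headD []).length r) st)
          (List.replicate grid.length (List.replicate (grid.headD []).length (0 : Int)), 1)).1 := rfl
  rw [hdef, outerA grid grid.length le_rfl]
  simp

theorem getD_take' {α : Type} (D : List α) (L x : Nat) (d : α) (hx : x < L) :
    (D.take L).getD x d = D.getD x d := by
  simp [List.getD_eq_getElem?_getD, hx]

-- under Pre_, the two flag tables decide exactly startP at every in-range cell
theorem table_eq (grid : List (List String)) (hpre : Pre_number_grid grid)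
    (r c : Nat) (hr : r < grid.length) (hc : c < (grid.headD []).length) :
    ((((grid.map (fun row => row.take (grid.headD []).length)).map runStarts).getD r []).getD c false
      || ((((List.range (grid.headD []).length)).map
            (fun c => runStarts ((grid.map (fun row => row.take (grid.headD []).length)).map
              (fun row => row.getD c "")))).getD c []).getD r false)
      = startP grid r c := by
  have hrow_mem : grid.getD r [] ∈ grid := by
    rw [List.getD_eq_getElem _ _ hr]; exact List.getElem_mem hr
  have hrlen : (grid.headD []).length ≤ (grid.getD r []).length := hpre.2 _ hrow_mem
  have hacr : (((grid.map (fun row => row.take (grid.headD []).length)).map runStarts).getD r [])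
      = runStarts ((grid.getD r []).take (grid.headD []).length) := by
    rw [List.getD_eq_getElem?_getD, List.getElem?_map, List.getElem?_map,
        List.getElem?_eq_getElem hr]
    simp only [Option.map_some, Option.getD_some]
    rw [List.getD_eq_getElem _ _ hr]
  have hdwn : ((((List.range (grid.headD []).length)).map
        (fun c => runStarts ((grid.map (fun row => row.take (grid.headD []).length)).map
          (fun row => row.getD c "")))).getD c [])
      = runStarts ((grid.map (fun row => row.take (grid.headD []).length)).map
          (fun row => row.getD c "")) := by
    rw [List.getD_eq_getElem?_getD, List.getElem?_map, List.getElem?_range hc]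
    rfl
  rw [hacr, hdwn, runStarts_getD, runStarts_getD]
  have htlen : ((grid.getD r []).take (grid.headD []).length).length = (grid.headD []).length := by
    rw [List.length_take]; omega
  have htget : ∀ x, x < (grid.headD []).length →
      ((grid.getD r []).take (grid.headD []).length).getD x "" = gcell grid r x := by
    intro x hx
    unfold gcell
    exact getD_take' _ _ _ _ hx
  have hclen : ((grid.map (fun row => row.take (grid.headD []).length)).map
      (fun row => row.getD c "")).length = grid.length := by simp
  have hcget : ∀ x, x < grid.length →
      ((grid.map (fun row => row.take (grid.headD []).length)).map
        (fun row => row.getD c "")).getD x "" = gcell grid x c := by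
    intro x hx
    rw [List.getD_eq_getElem?_getD, List.getElem?_map, List.getElem?_map,
        List.getElem?_eq_getElem hx]
    simp only [Option.map_some, Option.getD_some]
    rw [getD_take' _ _ _ _ hc]
    unfold gcell
    rw [List.getD_eq_getElem _ _ hx]
  unfold flagSpec startP
  rw [htlen, hclen, htget c hc, htget (c - 1) (by omega), hcget r hr, hcget (r - 1) (by omega)]
  by_cases hc1 : c + 1 < (grid.headD []).length
  · rw [htget (c + 1) hc1, decide_eq_true hc1]
    by_cases hr1 : r + 1 < grid.length
    · rw [hcget (r + 1) hr1, decide_eq_true hr1, Bool.eq_iff_iff]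
      simp only [Bool.or_eq_true, Bool.and_eq_true, Bool.true_and, bne_iff_ne, beq_iff_eq]
      tauto
    · rw [decide_eq_false hr1, Bool.eq_iff_iff]
      simp only [Bool.false_and, Bool.and_false, Bool.or_false, Bool.true_and,
        Bool.or_eq_true, Bool.and_eq_true, bne_iff_ne, beq_iff_eq]
      tauto
  · rw [decide_eq_false hc1]
    by_cases hr1 : r + 1 < grid.length
    · rw [hcget (r + 1) hr1, decide_eq_true hr1, Bool.eq_iff_iff]
      simp only [Bool.false_and, Bool.and_false, Bool.false_or, Bool.true_and,
        Bool.or_eq_true, Bool.and_eq_true, bne_iff_ne, beq_iff_eq]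
      tauto
    · rw [decide_eq_false hr1, Bool.eq_iff_iff]
      simp only [Bool.false_and, Bool.and_false, Bool.or_false]

theorem B_eq_canon (grid : List (List String)) (hpre : Pre_number_grid grid) :
    number_grid_alt grid = ((List.range grid.length).foldl (stepOutC grid) ([], 1)).1 := by
  have hdef : number_grid_alt grid
      = ((List.range (grid.map (fun row => row.take (grid.headD []).length)).length).foldl
          (fun (st : List (List Int) × Int) r =>
            let inner := (List.range (grid.headD []).length).foldl
              (fun (st2 : List Int × Int) c =>
                if ((((grid.map (fun row => row.take (grid.headD []).length)).map runStarts).getD r []).getD c false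
                    || ((((List.range (grid.headD []).length)).map
                          (fun c => runStarts ((grid.map (fun row => row.take (grid.headD []).length)).map
                            (fun row => row.getD c "")))).getD c []).getD r false) then
                  (st2.1 ++ [st2.2], st2.2 + 1)
                else (st2.1 ++ [(0 : Int)], st2.2))
              ([], st.2)
            (st.1 ++ [inner.1], inner.2))
          ([], 1)).1 := rfl
  rw [hdef]
  simp only [List.length_map]
  have hout := PySem.List.foldl_congr_mem (List.range grid.length)
    (fun (st : List (List Int) × Int) r =>
      let inner := (List.range (grid.headD []).length).foldl
        (fun (st2 : List Int × Int) c =>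
          if ((((grid.map (fun row => row.take (grid.headD []).length)).map runStarts).getD r []).getD c false
              || ((((List.range (grid.headD []).length)).map
                    (fun c => runStarts ((grid.map (fun row => row.take (grid.headD []).length)).map
                      (fun row => row.getD c "")))).getD c []).getD r false) then
            (st2.1 ++ [st2.2], st2.2 + 1)
          else (st2.1 ++ [(0 : Int)], st2.2))
        ([], st.2)
      (st.1 ++ [inner.1], inner.2))
    (stepOutC grid) ([], 1) ?_
  · rw [hout]
  · intro acc r hrm
    have hr : r < grid.length := List.mem_range.mp hrm
    have hin := PySem.List.foldl_congr_mem (List.range (grid.headD []).length)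
      (fun (st2 : List Int × Int) c =>
        if ((((grid.map (fun row => row.take (grid.headD []).length)).map runStarts).getD r []).getD c false
            || ((((List.range (grid.headD []).length)).map
                  (fun c => runStarts ((grid.map (fun row => row.take (grid.headD []).length)).map
                    (fun row => row.getD c "")))).getD c []).getD r false) then
          (st2.1 ++ [st2.2], st2.2 + 1)
        else (st2.1 ++ [(0 : Int)], st2.2))
      (stepC grid r) ([], acc.2) ?_
    · simp only [stepOutC]
      rw [hin]
    · intro acc2 c hcm
      have hc : c < (grid.headD []).length := List.mem_range.mp hcm
      simp only [stepC]
      rw [table_eq grid hpre r c hr hc]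

-- ===== VERDICT (by name: the statement is the Claim_ definition above) =====
theorem number_grid_spec : Claim_equal_number_grid := by
  intro grid _ hpre
  unfold Spec_number_grid
  rw [A_eq_canon grid, B_eq_canon grid hpre]
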